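-- pv_equiv track=rewrite | github.com/austinProGit/scheduler | src/schedule_inspector.py | semester_type_sequence
-- ===== SOURCE A (Python) =====
-- def schedule_length(schedule):
--     return len(schedule)
--
-- def semester_type_sequence(schedule):
--     SEMESTER_TYPE_SUCCESSOR = {'Fa': 'Sp', 'Sp': 'Su', 'Su': 'Fa'}
--     sequence = None
--     previous_season = 'Su'
--     if schedule_length(schedule) > 0:
--         sequence = []
--         for semester in schedule:
--             sequence.append(SEMESTER_TYPE_SUCCESSOR[previous_season])
--             previous_season = SEMESTER_TYPE_SUCCESSOR[previous_season]
--     return sequence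
-- ===== SOURCE B (Python) =====
-- def semester_type_sequence(schedule):
--     if len(schedule) == 0:
--         return None
--     cycle = ['Fa', 'Sp', 'Su']
--     return [cycle[i % 3] for i in range(len(schedule))]
-- ===== Notes on version B (the rewrite author's own statement) =====
-- stated objective: simpler
-- what changed: Replaced the iterative state machine threading previous_season through a successor dict with a closed-form positional lookup cycle[i % 3] over range(len(schedule)).
import Mathlib
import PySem

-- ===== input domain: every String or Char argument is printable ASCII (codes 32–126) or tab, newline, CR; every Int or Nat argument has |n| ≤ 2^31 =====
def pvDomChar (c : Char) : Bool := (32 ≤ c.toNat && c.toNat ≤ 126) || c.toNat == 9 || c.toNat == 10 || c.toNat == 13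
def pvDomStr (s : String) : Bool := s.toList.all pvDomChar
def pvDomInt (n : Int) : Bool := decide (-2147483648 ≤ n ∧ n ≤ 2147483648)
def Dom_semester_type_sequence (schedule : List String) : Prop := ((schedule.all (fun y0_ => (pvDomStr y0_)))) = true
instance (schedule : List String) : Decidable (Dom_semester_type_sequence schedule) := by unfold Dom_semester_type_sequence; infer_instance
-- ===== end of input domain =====

-- B replaces A's successor-dict state machine with a closed-form cycle[i % 3] lookup by position (objective: simpler).

-- ===== PORT A =====
-- the module constant SEMESTER_TYPE_SUCCESSOR
def pvSuccDict : PySem.Dict String String :=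
  PySem.Dict.ofList [("Fa", "Sp"), ("Sp", "Su"), ("Su", "Fa")]

-- SEMESTER_TYPE_SUCCESSOR[previous_season]; the key is always present on A's reachable states,
-- so the .getD "" default is never used
def pvSucc (s : String) : String := (pvSuccDict.get? s).getD ""

-- the for-loop over schedule, threading previous_season
def pvLoopA (rest : List String) (previous_season : String) : List String :=
  match rest with
  | [] => []
  | _ :: rest' => pvSucc previous_season :: pvLoopA rest' (pvSucc previous_season)

def schedule_length (schedule : List String) : Int := schedule.length

def semester_type_sequence (schedule : List String) : Option (List String) :=
  if schedule_length schedule > 0 then some (pvLoopA schedule "Su") else none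

-- ===== PORT B =====
def pvCycle : List String := ["Fa", "Sp", "Su"]

def semester_type_sequence_alt (schedule : List String) : Option (List String) :=
  if schedule.length = 0 then none
  else some ((List.range schedule.length).map (fun i => pvCycle.getD (i % 3) ""))

-- ===== PRECONDITION & SPEC =====
def Spec_semester_type_sequence (schedule : List String) (out : Option (List String)) : Prop := out = semester_type_sequence_alt schedule
instance (schedule : List String) (out : Option (List String)) : Decidable (Spec_semester_type_sequence schedule out) := by unfold Spec_semester_type_sequence; infer_instance

-- ===== CLAIM (what is proved, stated in full; the proofs are below) =====
def Claim_equal_semester_type_sequence : Prop := ∀ (schedule : List String), Dom_semester_type_sequence schedule → Spec_semester_type_sequence schedule (semester_type_sequence schedule)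

-- ===== LEMMAS AND PROOFS =====

def pvCyc (k : Nat) : String := pvCycle.getD (k % 3) ""

theorem pvSucc_cyc (k : Nat) : pvSucc (pvCyc k) = pvCyc (k + 1) := by
  have h : k % 3 = 0 ∨ k % 3 = 1 ∨ k % 3 = 2 := by omega
  rcases h with h | h | h <;>
    · have h' : (k + 1) % 3 = (k % 3 + 1) % 3 := by omega
      simp [pvCyc, h, h']
      decide

theorem pvLoopA_eq (l : List String) (k : Nat) :
    pvLoopA l (pvCyc k) = (List.range l.length).map (fun i => pvCyc (k + 1 + i)) := by
  induction l generalizing k with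
  | nil => simp [pvLoopA]
  | cons x rest ih =>
    simp only [pvLoopA, pvSucc_cyc, ih (k + 1), List.length_cons,
      List.range_succ_eq_map, List.map_cons, List.map_map]
    congr 1
    apply List.map_congr_left
    intro i _
    simp only [Function.comp]
    congr 1
    omega

theorem pvCyc_add_three (i : Nat) : pvCyc (3 + i) = pvCyc i := by
  unfold pvCyc
  congr 1
  omega

-- ===== VERDICT (by name: the statement is the Claim_ definition above) =====
theorem semester_type_sequence_spec : Claim_equal_semester_type_sequence := by
  intro schedule _
  unfold Spec_semester_type_sequence semester_type_sequence semester_type_sequence_alt schedule_length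
  rcases schedule with _ | ⟨x, rest⟩
  · simp
  · have hSu : ("Su" : String) = pvCyc 2 := by decide
    simp only [List.length_cons, Int.natCast_pos, Nat.succ_pos, if_pos, hSu,
      pvLoopA_eq _ 2]
    rw [if_neg (by simp)]
    congr 1
    apply List.map_congr_left
    intro i _
    rw [show 2 + 1 + i = 3 + i by omega, pvCyc_add_three]
    rfl
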